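-- pv_equiv track=rewrite | github.com/estephany-rm/ProgramacionI | Parcial 2/ejercicios_parcial.py | generar_calendario
-- ===== SOURCE A (Python) =====
-- def es_bisiesto(anio):
--     """
--     Determina si un año es bisiesto.
--     """
--     # bool: True si es bisiesto, False en caso contrario
--     return (anio % 4 == 0 and anio % 100 != 0) or (anio % 400 == 0)
--
-- def dias_en_mes(mes, anio):
--     """
--     Retorna el número de días en un mes específico.
--     """
--     # ValueError: Si mes es inválido (no está entre 1 y 12)
--     if not 1 <= mes <= 12:
--         raise ValueError("El mes debe estar entre 1 y 12.")
--     dias_por_mes = [0, 31, 28, 31, 30, 31, 30, 31, 31, 30, 31, 30, 31]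
--     if mes == 2 and es_bisiesto(anio):
--         return 29
--     return dias_por_mes[mes]
--
-- def generar_calendario(mes, anio, dia_inicio=0):
--     """
--     Genera representación string del calendario de un mes.
--     """
--     # Validamos dia_inicio para que esté siempre en el rango 0-6 (lunes-domingo)
--     dia_inicio = dia_inicio % 7
--     total_dias = dias_en_mes(mes, anio)
--     encabezado = "Lu Ma Mi Ju Vi Sa Do\n"
--     cuerpo = ""
--     # Se añaden los espacios iniciales según el día de inicio
--     cuerpo += "   " * dia_inicio
--
--     dia_actual_semana = dia_inicio
--     for dia in range(1, total_dias + 1):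
--         cuerpo += f"{dia: >2}"
--         dia_actual_semana += 1
--         if dia_actual_semana % 7 == 0:
--             if dia < total_dias:
--                 cuerpo += "\n"
--         else:
--             # Agregamos un espacio entre días
--             cuerpo += " "
--     return encabezado + cuerpo.rstrip()
-- ===== SOURCE B (Python) =====
-- def es_bisiesto(anio):
--     return (anio % 4 == 0 and anio % 100 != 0) or (anio % 400 == 0)
--
-- def dias_en_mes(mes, anio):
--     if not 1 <= mes <= 12:
--         raise ValueError("El mes debe estar entre 1 y 12.")
--     dias_por_mes = [0, 31, 28, 31, 30, 31, 30, 31, 31, 30, 31, 30, 31]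
--     if mes == 2 and es_bisiesto(anio):
--         return 29
--     return dias_por_mes[mes]
--
-- def generar_calendario(mes, anio, dia_inicio=0):
--     """Genera representacion string del calendario de un mes.
--
--     Pad-then-chunk: one flat list of 2-char cells, grouped into weeks of 7,
--     joined with spaces and newlines (no running week counter, no rstrip).
--     """
--     dia_inicio = dia_inicio % 7
--     total_dias = dias_en_mes(mes, anio)
--     cells = ["  "] * dia_inicio + [f"{d:>2}" for d in range(1, total_dias + 1)]
--     rows = [cells[i:i + 7] for i in range(0, len(cells), 7)]
--     return "Lu Ma Mi Ju Vi Sa Do\n" + "\n".join(" ".join(r) for r in rows)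
-- ===== Notes on version B (the rewrite author's own statement) =====
-- stated objective: simpler
-- what changed: A's running week counter with an inline newline-vs-space decision and a final rstrip is replaced by building one flat list of 2-char cells (padding cells then day cells), chunking it into rows of 7 and joining with spaces and newlines.
import Mathlib
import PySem

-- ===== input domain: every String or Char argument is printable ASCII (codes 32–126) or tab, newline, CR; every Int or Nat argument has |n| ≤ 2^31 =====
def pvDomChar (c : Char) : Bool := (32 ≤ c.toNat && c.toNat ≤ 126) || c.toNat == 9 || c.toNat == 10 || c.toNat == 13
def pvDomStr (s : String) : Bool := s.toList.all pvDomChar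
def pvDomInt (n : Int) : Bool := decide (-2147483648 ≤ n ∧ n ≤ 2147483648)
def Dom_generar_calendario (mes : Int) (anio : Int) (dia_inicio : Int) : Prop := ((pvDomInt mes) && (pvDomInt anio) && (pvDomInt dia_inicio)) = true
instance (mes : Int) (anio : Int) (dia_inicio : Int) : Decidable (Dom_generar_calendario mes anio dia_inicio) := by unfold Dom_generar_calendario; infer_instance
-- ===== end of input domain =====

-- B replaces A's running week counter and inline newline/space/rstrip logic by a
-- pad-then-chunk decomposition (flat cell list grouped into weeks of 7); objective: simpler.
-- String building is ported on List Char (PySem.Chars) with String.ofList at the boundary, per the PySem convention.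

-- ===== PORT A =====
def es_bisiesto (anio : Int) : Bool :=
  (PySem.Int.mod anio 4 == 0 && PySem.Int.mod anio 100 != 0) || PySem.Int.mod anio 400 == 0

-- A's dias_en_mes; none = the ValueError branch (mes outside 1..12)
def dias_en_mes? (mes : Int) (anio : Int) : Option Int :=
  if ¬ (1 ≤ mes ∧ mes ≤ 12) then none
  else
    let dias_por_mes : List Int := [0, 31, 28, 31, 30, 31, 30, 31, 31, 30, 31, 30, 31]
    if mes = 2 ∧ es_bisiesto anio then some 29
    else PySem.List.pyGet? dias_por_mes mes

-- f"{dia: >2}": right-align in width 2, pad with a space (exact for the nonnegative ints fed to it)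
def fmt2 (d : Int) : List Char :=
  let s := PySem.Int.toChars d
  if s.length < 2 then ' ' :: s else s

-- the body of A's generar_calendario after dias_en_mes returned (total = total_dias, d0 = dia_inicio % 7)
def cuerpoA (total : Int) (d0 : Int) : List Char :=
  let cuerpo : List Char := PySem.List.pyRepeat "   ".toList d0   -- "   " * dia_inicio
  let st := (PySem.List.pyRange 1 (total + 1) 1).foldl
    (fun (st : List Char × Int) dia =>
      let c := st.1 ++ fmt2 dia                -- cuerpo += f"{dia: >2}"
      let w := st.2 + 1                        -- dia_actual_semana += 1
      if PySem.Int.mod w 7 = 0 then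
        (if dia < total then (c ++ ['\n'], w) else (c, w))
      else (c ++ [' '], w))
    (cuerpo, d0)
  "Lu Ma Mi Ju Vi Sa Do\n".toList ++ PySem.Chars.rstrip st.1

def generar_calendario (mes : Int) (anio : Int) (dia_inicio : Int) : String :=
  let d0 := PySem.Int.mod dia_inicio 7
  match dias_en_mes? mes anio with
  | none => ""          -- Python raises ValueError here; excluded by Pre_
  | some total => String.ofList (cuerpoA total d0)

-- ===== PORT B =====
-- f"{d:>2}" as Source B's cell comprehension uses it
def fmt2_alt (d : Int) : List Char :=
  let s := PySem.Int.toChars d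
  if s.length < 2 then ' ' :: s else s

-- the body of Source B's generar_calendario: flat cell list, chunked into weeks of 7
def cuerpoB (total : Int) (d0 : Int) : List Char :=
  let cells : List (List Char) :=
    PySem.List.pyRepeat ["  ".toList] d0 ++ (PySem.List.pyRange 1 (total + 1) 1).map fmt2_alt
  let rows : List (List (List Char)) :=
    (PySem.List.pyRange 0 (cells.length : Int) 7).map
      (fun i => PySem.List.slice cells (some i) (some (i + 7)))   -- cells[i:i+7]
  "Lu Ma Mi Ju Vi Sa Do\n".toList ++
    PySem.Chars.join ['\n'] (rows.map (fun r => PySem.Chars.join [' '] r))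

def generar_calendario_alt (mes : Int) (anio : Int) (dia_inicio : Int) : String :=
  let d0 := PySem.Int.mod dia_inicio 7
  match dias_en_mes? mes anio with
  | none => ""          -- Python raises ValueError here; excluded by Pre_
  | some total => String.ofList (cuerpoB total d0)

-- ===== PRECONDITION & SPEC =====
-- Pre_ excludes exactly the inputs where A raises ValueError (mes outside 1..12)
def Pre_generar_calendario (mes : Int) (anio : Int) (dia_inicio : Int) : Prop :=
  1 ≤ mes ∧ mes ≤ 12
instance (mes : Int) (anio : Int) (dia_inicio : Int) : Decidable (Pre_generar_calendario mes anio dia_inicio) := by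
  unfold Pre_generar_calendario; infer_instance

def pvWitness_generar_calendario : Int × Int × Int := (2, 2024, 3)

def Spec_generar_calendario (mes : Int) (anio : Int) (dia_inicio : Int) (out : String) : Prop := out = generar_calendario_alt mes anio dia_inicio
instance (mes : Int) (anio : Int) (dia_inicio : Int) (out : String) : Decidable (Spec_generar_calendario mes anio dia_inicio out) := by unfold Spec_generar_calendario; infer_instance

-- ===== CLAIM (what is proved, stated in full; the proofs are below) =====
def Claim_equal_generar_calendario : Prop := ∀ (mes : Int) (anio : Int) (dia_inicio : Int), Dom_generar_calendario mes anio dia_inicio → Pre_generar_calendario mes anio dia_inicio → Spec_generar_calendario mes anio dia_inicio (generar_calendario mes anio dia_inicio)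

-- ===== LEMMAS AND PROOFS =====

-- any value dias_en_mes? returns is one of the four month lengths
lemma dias_mem (mes anio t : Int) (h : dias_en_mes? mes anio = some t) :
    t = 28 ∨ t = 29 ∨ t = 30 ∨ t = 31 := by
  unfold dias_en_mes? at h
  split_ifs at h with h1 h2
  · simp at h; omega
  · obtain ⟨hlo, hhi⟩ := h1
    interval_cases mes <;> (simp [PySem.List.pyGet?, PySem.List.pyIdx?] at h; omega)

-- the two bodies agree for every month length and every start-of-week offset
set_option maxRecDepth 40000 in
lemma cuerpo_eq (t k : Int) (ht : t = 28 ∨ t = 29 ∨ t = 30 ∨ t = 31)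
    (hk0 : 0 ≤ k) (hk7 : k < 7) : cuerpoA t k = cuerpoB t k := by
  rcases ht with rfl | rfl | rfl | rfl <;> interval_cases k <;> rfl

-- ===== VERDICT (by name: the statement is the Claim_ definition above) =====
theorem generar_calendario_spec : Claim_equal_generar_calendario := by
  intro mes anio dia_inicio _ _
  unfold Spec_generar_calendario generar_calendario generar_calendario_alt
  cases h : dias_en_mes? mes anio with
  | none => rfl
  | some t =>
    exact congrArg String.ofList (cuerpo_eq t _ (dias_mem mes anio t h)
      (PySem.Int.mod_nonneg dia_inicio (by norm_num))
      (PySem.Int.mod_lt dia_inicio (by norm_num)))
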